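-- pv_equiv track=rewrite | github.com/alestar/InterviewPrep | src/MyPython/Interviews/Walmart/ConsolidatingPartitions.py | consolidate_partitions
-- ===== SOURCE A (Python) =====
-- def consolidate_partitions(used, max_capacity):
--     n= len(used)
--     partitions = sorted(zip(used, max_capacity), key=lambda x: x[1])
--     count = 0
--     i = 0
--
--     while i < n:
--         current_used, current_max = partitions[i]
--         j = i + 1
--
--         while j < n and current_used + partitions[j][0] <= current_max: # Try to fit as many partitions as possible into the current one
--             current_used += partitions[j][0]
--             j += 1
--
--         count += 1
--         i = j
--
--     return count
-- ===== SOURCE B (Python) =====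
-- def consolidate_partitions(used, max_capacity):
--     parts = sorted(zip(used, max_capacity), key=lambda x: x[1])
--     n = len(parts)
--     # staged pass: prefix sums of the sorted used values
--     prefix = [0]
--     for u, _ in parts:
--         prefix.append(prefix[-1] + u)
--     # recursion over group-start indices; membership is pure prefix-sum arithmetic
--     def groups_from(i):
--         if i >= n:
--             return 0
--         m = parts[i][1]
--         j = i + 1
--         while j < n and prefix[j + 1] - prefix[i] <= m:
--             j += 1
--         return 1 + groups_from(j)
--     return groups_from(0)
-- ===== Notes on version B (the rewrite author's own statement) =====
-- stated objective: alternative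
-- what changed: Replaces A's running-accumulator nested while loops with a staged prefix-sum pass over the sorted pairs followed by recursion over group-start indices, deciding group membership by the arithmetic test prefix[j+1] - prefix[i] <= max_i instead of maintaining current_used.
import Mathlib
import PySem

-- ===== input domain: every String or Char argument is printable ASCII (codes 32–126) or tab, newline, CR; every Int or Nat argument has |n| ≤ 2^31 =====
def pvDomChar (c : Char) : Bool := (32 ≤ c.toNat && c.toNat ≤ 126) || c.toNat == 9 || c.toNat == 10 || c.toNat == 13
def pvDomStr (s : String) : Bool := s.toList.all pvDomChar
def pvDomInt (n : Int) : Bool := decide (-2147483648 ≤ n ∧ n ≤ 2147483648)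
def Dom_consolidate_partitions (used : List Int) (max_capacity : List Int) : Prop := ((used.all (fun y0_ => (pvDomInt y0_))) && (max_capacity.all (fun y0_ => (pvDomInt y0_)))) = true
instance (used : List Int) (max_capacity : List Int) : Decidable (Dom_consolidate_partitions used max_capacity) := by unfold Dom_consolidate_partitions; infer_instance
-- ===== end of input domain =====

-- B replaces A's running-accumulator nested whiles by a staged prefix-sum pass plus
-- recursion over group-start indices (alternative decomposition, same O(n log n) cost).

-- ===== PORT A =====
-- Inner while of A: absorb following items while current_used + item <= current_max;
-- returns (final current_used, remaining suffix = partitions[j:]).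
def pvAInner (cu cm : Int) : List (Int × Int) → Int × List (Int × Int)
  | [] => (cu, [])
  | (u, m) :: t =>
      if cu + u <= cm then pvAInner (cu + u) cm t else (cu, (u, m) :: t)

-- Outer while of A, consuming the sorted list (fuel only makes the recursion structural:
-- each step drops at least the head, so fuel = length suffices). Under Pre_
-- (len(used) ≤ len(max_capacity)) the bound n = len(used) equals the zipped list's length,
-- so iterating to the end of the list is exactly A's 'while i < n' (on inputs where A
-- would index past the zip, A raises and Pre_ excludes them).
def pvAOuter : Nat → List (Int × Int) → Int
  | 0, _ => 0
  | _ + 1, [] => 0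
  | fuel + 1, (u, m) :: t => 1 + pvAOuter fuel (pvAInner u m t).2

def consolidate_partitions (used : List Int) (max_capacity : List Int) : Int :=
  let partitions := PySem.List.sorted (used.zip max_capacity) (fun x => x.2) false
  pvAOuter partitions.length partitions

-- ===== PORT B =====
-- Source B's staged prefix-sum pass: prefix = [0]; for u,_ in parts: prefix.append(prefix[-1]+u)
def pvPrefix (acc : Int) : List (Int × Int) → List Int
  | [] => [acc]
  | (u, _) :: t => acc :: pvPrefix (acc + u) t

-- Source B's inner 'while j < n and prefix[j+1] - prefix[i] <= m: j += 1'; fuel = n suffices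
-- since j only increases and the loop stops at n. Prefix indices stay in [0, n], so getD
-- never applies its default: exact.
def pvFindEnd (P : List Int) (base m : Int) (n : Nat) : Nat → Nat → Nat
  | 0, j => j
  | fuel + 1, j =>
      if j < n ∧ P.getD (j + 1) 0 - base ≤ m then pvFindEnd P base m n fuel (j + 1) else j

-- Source B's recursive groups_from over the start index; each call advances the index by at
-- least one, so fuel = n suffices (parts index in range when i < n: exact).
def pvGroups (parts : List (Int × Int)) (P : List Int) (n : Nat) : Nat → Nat → Int
  | 0, _ => 0
  | fuel + 1, i =>
      if i < n then
        1 + pvGroups parts P n fuel (pvFindEnd P (P.getD i 0) (parts.getD i (0, 0)).2 n n (i + 1))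
      else 0

def consolidate_partitions_alt (used : List Int) (max_capacity : List Int) : Int :=
  let parts := PySem.List.sorted (used.zip max_capacity) (fun x => x.2) false
  let P := pvPrefix 0 parts
  pvGroups parts P parts.length parts.length 0

-- ===== PRECONDITION =====
-- Pre_ excludes exactly the inputs where A raises IndexError: len(used) > len(max_capacity)
-- (A's loop bound is len(used) but it indexes the shorter zip).
def Pre_consolidate_partitions (used : List Int) (max_capacity : List Int) : Prop :=
  used.length ≤ max_capacity.length
instance (used : List Int) (max_capacity : List Int) : Decidable (Pre_consolidate_partitions used max_capacity) := by unfold Pre_consolidate_partitions; infer_instance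

def pvWitness_consolidate_partitions : List Int × List Int := ([3, 1, 2], [5, 10, 4])

-- ===== SPEC =====
def Spec_consolidate_partitions (used : List Int) (max_capacity : List Int) (out : Int) : Prop := out = consolidate_partitions_alt used max_capacity
instance (used : List Int) (max_capacity : List Int) (out : Int) : Decidable (Spec_consolidate_partitions used max_capacity out) := by unfold Spec_consolidate_partitions; infer_instance

-- ===== CLAIM (what is proved, stated in full; the proofs are below) =====
def Claim_equal_consolidate_partitions : Prop := ∀ (used : List Int) (max_capacity : List Int), Dom_consolidate_partitions used max_capacity → Pre_consolidate_partitions used max_capacity → Spec_consolidate_partitions used max_capacity (consolidate_partitions used max_capacity)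

-- ===== LEMMAS AND PROOFS =====

theorem pvAOuter_nil (fuel : Nat) : pvAOuter fuel [] = 0 := by
  cases fuel <;> simp [pvAOuter]

theorem pvAOuter_cons (fuel : Nat) (u m : Int) (t : List (Int × Int)) :
    pvAOuter (fuel + 1) ((u, m) :: t) = 1 + pvAOuter fuel (pvAInner u m t).2 := by
  simp [pvAOuter]

theorem pvPrefix_getD_zero (acc : Int) (l : List (Int × Int)) :
    (pvPrefix acc l).getD 0 0 = acc := by
  cases l with
  | nil => simp [pvPrefix]
  | cons h t => obtain ⟨u, m⟩ := h; simp [pvPrefix]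

-- Successive prefix-sum entries differ by the used value at that index.
theorem pvPrefix_step (acc : Int) (l : List (Int × Int)) (j : Nat) (hj : j < l.length) :
    (pvPrefix acc l).getD (j + 1) 0
      = (pvPrefix acc l).getD j 0 + (l.getD j (0, 0)).1 := by
  induction l generalizing acc j with
  | nil => simp at hj
  | cons h t ih =>
    obtain ⟨u, m⟩ := h
    cases j with
    | zero =>
      have h0 := pvPrefix_getD_zero (acc + u) t
      simp only [List.getD] at h0 ⊢
      simp [pvPrefix, h0]
    | succ j =>
      simp only [List.length_cons] at hj
      simpa [pvPrefix] using ih (acc + u) j (by omega)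

theorem pvFindEnd_ge (P : List Int) (base m : Int) (n fuel j : Nat) :
    j ≤ pvFindEnd P base m n fuel j := by
  induction fuel generalizing j with
  | zero => simp [pvFindEnd]
  | succ fuel ih =>
    simp only [pvFindEnd]
    split
    · exact le_trans (Nat.le_succ j) (ih (j + 1))
    · exact le_refl j

-- A's inner while, started at suffix index j with accumulator P[j] - base,
-- leaves exactly the suffix at Source B's while-exit index.
theorem pvInner_eq_findEnd (parts : List (Int × Int)) (P : List Int)
    (hP : P = pvPrefix 0 parts) (base m : Int) (fuel j : Nat)
    (hfuel : parts.length - j ≤ fuel) :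
    (pvAInner (P.getD j 0 - base) m (parts.drop j)).2
      = parts.drop (pvFindEnd P base m parts.length fuel j) := by
  induction fuel generalizing j with
  | zero =>
    rw [List.drop_eq_nil_of_le (by omega)]
    simp only [pvFindEnd, pvAInner]
    rw [List.drop_eq_nil_of_le (by omega)]
  | succ fuel ih =>
    by_cases hjn : j < parts.length
    · have hstep : P.getD (j + 1) 0 = P.getD j 0 + (parts.getD j (0, 0)).1 := by
        rw [hP]; exact pvPrefix_step 0 parts j hjn
      have hpj : parts[j] = ((parts.getD j (0, 0)).1, (parts.getD j (0, 0)).2) := by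
        rw [List.getD_eq_getElem parts (0, 0) hjn]
      by_cases hle : P.getD (j + 1) 0 - base ≤ m
      · rw [List.drop_eq_getElem_cons hjn, hpj]
        simp only [pvAInner, pvFindEnd]
        rw [if_pos (by omega), if_pos ⟨hjn, hle⟩]
        have hacc : P.getD j 0 - base + (parts.getD j (0, 0)).1 = P.getD (j + 1) 0 - base := by
          omega
        rw [hacc]
        exact ih (j + 1) (by omega)
      · rw [List.drop_eq_getElem_cons hjn, hpj]
        simp only [pvAInner, pvFindEnd]
        rw [if_neg (by omega), if_neg (by intro hc; exact hle hc.2), ← hpj,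
            ← List.drop_eq_getElem_cons hjn]
    · rw [List.drop_eq_nil_of_le (by omega)]
      simp only [pvAInner, pvFindEnd]
      rw [if_neg (by intro hc; exact hjn hc.1), List.drop_eq_nil_of_le (by omega)]

-- groups_from i counts the same groups A's outer loop counts on the suffix from i.
theorem pvGroups_eq_outer (parts : List (Int × Int)) (P : List Int)
    (hP : P = pvPrefix 0 parts) (fuelB i : Nat) (hB : parts.length - i ≤ fuelB)
    (fuelA : Nat) (hA : (parts.drop i).length ≤ fuelA) :
    pvGroups parts P parts.length fuelB i = pvAOuter fuelA (parts.drop i) := by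
  induction fuelB generalizing i fuelA with
  | zero =>
    rw [List.drop_eq_nil_of_le (by omega)]
    simp [pvGroups, pvAOuter_nil]
  | succ fuelB ih =>
    by_cases hi : i < parts.length
    · have hlen : (parts.drop i).length = parts.length - i := List.length_drop ..
      obtain ⟨fA, rfl⟩ : ∃ fA, fuelA = fA + 1 := by
        cases fuelA with
        | zero => omega
        | succ fA => exact ⟨fA, rfl⟩
      have hpi : parts[i] = ((parts.getD i (0, 0)).1, (parts.getD i (0, 0)).2) := by
        rw [List.getD_eq_getElem parts (0, 0) hi]
      have hstep : P.getD (i + 1) 0 = P.getD i 0 + (parts.getD i (0, 0)).1 := by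
        rw [hP]; exact pvPrefix_step 0 parts i hi
      have hacc : (parts.getD i (0, 0)).1 = P.getD (i + 1) 0 - P.getD i 0 := by omega
      rw [List.drop_eq_getElem_cons hi, hpi, pvAOuter_cons, hacc,
          pvInner_eq_findEnd parts P hP (P.getD i 0) (parts.getD i (0, 0)).2
            parts.length (i + 1) (by omega)]
      have hk := pvFindEnd_ge P (P.getD i 0) (parts.getD i (0, 0)).2 parts.length
        parts.length (i + 1)
      rw [← ih (pvFindEnd P (P.getD i 0) (parts.getD i (0, 0)).2 parts.length parts.length
            (i + 1)) (by omega) fA (by rw [List.length_drop]; omega)]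
      simp only [pvGroups]
      rw [if_pos hi]
    · rw [List.drop_eq_nil_of_le (by omega)]
      simp only [pvGroups, pvAOuter_nil]
      rw [if_neg hi]

-- ===== VERDICT (by name: the statement is the Claim_ definition above) =====
theorem consolidate_partitions_spec : Claim_equal_consolidate_partitions := by
  intro used max_capacity _ _
  unfold Spec_consolidate_partitions consolidate_partitions consolidate_partitions_alt
  exact (pvGroups_eq_outer (PySem.List.sorted (used.zip max_capacity) (fun x => x.2) false)
    _ rfl _ 0 (by omega) _ (by simp)).symm
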